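-- pv_equiv track=rewrite | github.com/davidloke/tebac-net | TeBaC-NET.py | findAllEntities
-- ===== SOURCE A (Python) =====
-- def findAllEntities(searchTerm, inputString, entityTag):
--
--   if len(searchTerm) < 1 or len(inputString) < 1 or len(entityTag) < 1:
--     return []
--
--   workingString = inputString
--   entityList = []
--   startIndex = 0
--   findResult = workingString.find(searchTerm, startIndex, len(inputString))
--   while findResult != -1:
--     entityList.append((findResult, findResult + len(searchTerm), entityTag.upper()))
--     startIndex = findResult + len(searchTerm)
--     findResult = workingString.find(searchTerm, startIndex, len(inputString))
--
--   return entityList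
-- ===== SOURCE B (Python) =====
-- def findAllEntities(searchTerm, inputString, entityTag):
--
--   if len(searchTerm) < 1 or len(inputString) < 1 or len(entityTag) < 1:
--     return []
--
--   tag = entityTag.upper()
--   width = len(searchTerm)
--   spans = []
--   pos = 0
--   for piece in inputString.split(searchTerm)[:-1]:
--     pos += len(piece)
--     spans.append((pos, pos + width, tag))
--     pos += width
--   return spans
-- ===== Notes on version B (the rewrite author's own statement) =====
-- stated objective: idiomatic
-- what changed: Replaces the manual while-loop of repeated str.find calls with one str.split(searchTerm) and a single pass over the resulting pieces, reconstructing each span from cumulative piece lengths.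
import Mathlib
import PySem

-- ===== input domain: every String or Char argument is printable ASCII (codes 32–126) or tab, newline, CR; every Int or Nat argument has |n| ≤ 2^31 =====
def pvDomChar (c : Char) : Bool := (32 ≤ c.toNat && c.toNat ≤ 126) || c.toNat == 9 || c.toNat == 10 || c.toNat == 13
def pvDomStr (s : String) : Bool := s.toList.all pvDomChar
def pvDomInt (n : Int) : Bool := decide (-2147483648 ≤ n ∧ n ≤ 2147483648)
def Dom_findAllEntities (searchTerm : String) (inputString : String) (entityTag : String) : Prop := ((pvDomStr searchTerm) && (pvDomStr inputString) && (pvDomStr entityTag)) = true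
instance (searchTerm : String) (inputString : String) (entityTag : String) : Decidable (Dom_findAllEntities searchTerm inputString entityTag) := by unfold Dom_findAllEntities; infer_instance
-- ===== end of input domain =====

-- B replaces A's manual while-loop of repeated str.find calls with one str.split and a single
-- pass over the pieces (idiomatic; same asymptotic cost); return values proved equal everywhere.

-- ===== PORT A =====
-- the 'while findResult != -1' loop; the fuel argument only makes the recursion total
-- (the proof shows fuel = len(inputString)+1 never runs out: each iteration advances startIndex)
def findAllEntitiesGo (searchTerm : String) (inputString : String) (entityTag : String)
    (fuel : Nat) (startIndex : Int) (entityList : List (Int × Int × String)) :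
    List (Int × Int × String) :=
  match fuel with
  | 0 => entityList
  | fuel + 1 =>
    let findResult := PySem.Str.findFrom inputString searchTerm startIndex (some (PySem.Str.len inputString))
    if findResult = -1 then entityList
    else findAllEntitiesGo searchTerm inputString entityTag fuel
      (findResult + PySem.Str.len searchTerm)
      (entityList ++ [(findResult, findResult + PySem.Str.len searchTerm, PySem.Str.upper entityTag)])

def findAllEntities (searchTerm : String) (inputString : String) (entityTag : String) :
    List (Int × Int × String) :=
  if PySem.Str.len searchTerm < 1 ∨ PySem.Str.len inputString < 1 ∨ PySem.Str.len entityTag < 1 then []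
  else findAllEntitiesGo searchTerm inputString entityTag (inputString.toList.length + 1) 0 []

-- ===== PORT B =====
def findAllEntities_alt (searchTerm : String) (inputString : String) (entityTag : String) :
    List (Int × Int × String) :=
  if PySem.Str.len searchTerm < 1 ∨ PySem.Str.len inputString < 1 ∨ PySem.Str.len entityTag < 1 then []
  else
    let tag := PySem.Str.upper entityTag
    let width := PySem.Str.len searchTerm
    match PySem.Str.split? inputString searchTerm with
    | none => []   -- unreachable: the guard ensures searchTerm ≠ "" (Python split raises only for sep = "")
    | some pieces =>
      ((PySem.List.slice pieces none (some (-1))).foldl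
        (fun st piece =>
          let pos := st.1 + PySem.Str.len piece
          (pos + width, st.2 ++ [(pos, pos + width, tag)]))
        ((0 : Int), ([] : List (Int × Int × String)))).2

-- ===== PRECONDITION & SPEC =====
def Spec_findAllEntities (searchTerm : String) (inputString : String) (entityTag : String) (out : List (Int × Int × String)) : Prop := out = findAllEntities_alt searchTerm inputString entityTag
instance (searchTerm : String) (inputString : String) (entityTag : String) (out : List (Int × Int × String)) : Decidable (Spec_findAllEntities searchTerm inputString entityTag out) := by unfold Spec_findAllEntities; infer_instance

-- ===== CLAIM (what is proved, stated in full; the proofs are below) =====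
def Claim_equal_findAllEntities : Prop := ∀ (searchTerm : String) (inputString : String) (entityTag : String), Dom_findAllEntities searchTerm inputString entityTag → Spec_findAllEntities searchTerm inputString entityTag (findAllEntities searchTerm inputString entityTag)

-- ===== LEMMAS AND PROOFS =====

-- the list of pieces str.split(sep) produces, characterised by the FIRST occurrence of sep
def pverParts (sep : List Char) (l : List Char) : List (List Char) :=
  if h : PySem.Chars.find l sep = -1 ∨ sep = [] then [l]
  else
    (l.take (PySem.Chars.find l sep).toNat) ::
      pverParts sep (l.drop ((PySem.Chars.find l sep).toNat + sep.length))
termination_by l.length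
decreasing_by
  push Not at h
  have h1 : sep <:+: l := (PySem.Chars.find_ne_neg_one_iff l sep).1 h.1
  have h2 : sep.length ≤ l.length := List.IsInfix.length_le h1
  have h3 : 0 < sep.length := List.length_pos_iff.2 h.2
  simp only [List.length_drop]
  omega

lemma pverParts_ne_nil (sep l : List Char) : pverParts sep l ≠ [] := by
  unfold pverParts; split <;> simp

-- the spans both programs emit, read off the split pieces: one span between consecutive pieces
def pvSpans (width : Int) (tag : String) : List (List Char) → Int → List (Int × Int × String)
  | [], _ => []
  | [_], _ => []
  | p :: q :: rest, pos =>
    ((pos + p.length, pos + p.length + width, tag)) ::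
      pvSpans width tag (q :: rest) (pos + p.length + width)

lemma find_go_shift (sub : List Char) : ∀ (l : List Char) (k : Nat),
    PySem.Chars.find.go sub l k =
      if PySem.Chars.find l sub = -1 then -1 else (k : Int) + PySem.Chars.find l sub := by
  intro l
  induction l with
  | nil =>
    intro k
    simp [PySem.Chars.find, PySem.Chars.find.go]
    split <;> simp
  | cons c t ih =>
    intro k
    rw [PySem.Chars.find.go]
    by_cases hp : sub.isPrefixOf (c :: t) = true
    · simp [PySem.Chars.find, PySem.Chars.find.go, hp]
    · simp only [Bool.not_eq_true] at hp
      simp only [hp, Bool.false_eq_true, if_false]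
      rw [ih]
      conv_rhs => rw [PySem.Chars.find, PySem.Chars.find.go]
      simp only [hp, Bool.false_eq_true, if_false]
      rw [show PySem.Chars.find.go sub t 1 = _ from ih 1]
      have hge := PySem.Chars.neg_one_le_find t sub
      simp only [PySem.Chars.find] at hge ⊢
      split
      · simp
      · rename_i hne
        rw [if_neg (by omega)]
        push_cast; ring

lemma find_cons_of_not_prefix {sub : List Char} (c : Char) (rest : List Char)
    (hp : sub.isPrefixOf (c :: rest) = false) :
    PySem.Chars.find (c :: rest) sub =
      if PySem.Chars.find rest sub = -1 then -1 else 1 + PySem.Chars.find rest sub := by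
  rw [PySem.Chars.find, PySem.Chars.find.go]
  simp only [hp, Bool.false_eq_true, if_false]
  rw [find_go_shift]
  norm_num

lemma find_nil_of_ne (sep : List Char) (hsep : sep ≠ []) : PySem.Chars.find [] sep = -1 := by
  rw [PySem.Chars.find, PySem.Chars.find.go]
  simp [hsep]

lemma modifyHead_id' {α : Type} (l : List α) : List.modifyHead (fun x => x) l = l := by
  cases l <;> simp

lemma splitOn_go_spec (sep : List Char) (hsep : sep ≠ []) :
    ∀ (fuel : Nat) (l cur : List Char) (acc : List (List Char)), l.length < fuel →
      PySem.Chars.splitOn.go sep fuel l cur acc =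
        acc.reverse ++ (pverParts sep l).modifyHead (cur.reverse ++ ·) := by
  intro fuel
  induction fuel with
  | zero => intro l cur acc h; omega
  | succ fuel ih =>
    intro l cur acc h
    match l with
    | [] =>
      rw [PySem.Chars.splitOn.go]
      · rw [pverParts]
        simp [find_nil_of_ne sep hsep]
      · omega
    | c :: rest =>
      rw [PySem.Chars.splitOn.go]
      by_cases hp : sep.isPrefixOf (c :: rest) = true
      · simp only [hp, if_true]
        rw [ih _ _ _ (by simp only [List.length_drop]; have := List.length_pos_iff.2 hsep; simp at h ⊢; omega)]
        have hf : PySem.Chars.find (c :: rest) sep = 0 := by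
          rw [PySem.Chars.find, PySem.Chars.find.go]; simp [hp]
        conv_rhs => rw [pverParts]
        rw [dif_neg (by simp [hf, hsep])]
        simp [hf, modifyHead_id']
      · simp only [Bool.not_eq_true] at hp
        simp only [hp, Bool.false_eq_true, if_false]
        rw [ih _ _ _ (by simp at h ⊢; omega)]
        have hf := find_cons_of_not_prefix c rest hp
        have hge := PySem.Chars.neg_one_le_find rest sep
        by_cases hr : PySem.Chars.find rest sep = -1
        · have hfl : PySem.Chars.find (c :: rest) sep = -1 := by rw [hf]; simp [hr]
          conv_rhs => rw [pverParts]
          rw [dif_pos (Or.inl hfl)]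
          rw [pverParts, dif_pos (Or.inl hr)]
          simp
        · have hf0 : 0 ≤ PySem.Chars.find rest sep := by omega
          have hfl : PySem.Chars.find (c :: rest) sep = 1 + PySem.Chars.find rest sep := by
            rw [hf, if_neg hr]
          rw [pverParts, dif_neg (by simp [hr, hsep])]
          conv_rhs => rw [pverParts]
          rw [dif_neg (by simp [hfl, hsep]; omega)]
          have ht : (PySem.Chars.find (c :: rest) sep).toNat
              = (PySem.Chars.find rest sep).toNat + 1 := by rw [hfl]; omega
          rw [ht]
          have hidx : (PySem.Chars.find rest sep).toNat + 1 + sep.length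
              = ((PySem.Chars.find rest sep).toNat + sep.length) + 1 := by omega
          rw [hidx, List.take_succ_cons, List.drop_succ_cons]
          simp

lemma splitOn_eq_pverParts (sep l : List Char) (hsep : sep ≠ []) :
    PySem.Chars.splitOn l sep = pverParts sep l := by
  rw [PySem.Chars.splitOn]
  rw [splitOn_go_spec sep hsep (l.length + 1) l [] [] (by omega)]
  simp [modifyHead_id']

lemma findFrom_end_len (s sub : String) (k : Nat) (hk : k ≤ s.toList.length) :
    PySem.Str.findFrom s sub (k : Int) (some ((s.toList.length : Int))) =
      if PySem.Chars.find (s.toList.drop k) sub.toList = -1 then -1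
      else (k : Int) + PySem.Chars.find (s.toList.drop k) sub.toList := by
  simp only [PySem.Str.findFrom_eq]
  rw [PySem.Chars.findFrom]
  simp only [lt_irrefl, if_false]
  rw [if_neg (show ¬((s.toList.length : Int) < 0) by omega)]
  rw [if_neg (show ¬((k : Int) < 0) by omega)]
  rw [if_neg (show ¬((s.toList.length : Int) < (k : Int)) by omega)]
  simp only [Int.toNat_natCast, List.take_length]

lemma loopA_spec (searchTerm inputString entityTag : String)
    (hsub : searchTerm.toList ≠ []) :
    ∀ (fuel : Nat) (k : Nat) (acc : List (Int × Int × String)),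
      k ≤ inputString.toList.length → inputString.toList.length - k < fuel →
      findAllEntitiesGo searchTerm inputString entityTag fuel (k : Int) acc =
        acc ++ pvSpans (searchTerm.toList.length : Int) (PySem.Str.upper entityTag)
          (pverParts searchTerm.toList (inputString.toList.drop k)) (k : Int) := by
  intro fuel
  induction fuel with
  | zero => intro k acc h1 h2; omega
  | succ fuel ih =>
    intro k acc hk hf
    rw [findAllEntitiesGo]
    simp only [PySem.Str.len_eq]
    rw [findFrom_end_len _ _ k hk]
    by_cases hr : PySem.Chars.find (inputString.toList.drop k) searchTerm.toList = -1
    · rw [if_pos hr]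
      rw [pverParts, dif_pos (Or.inl hr)]
      simp [pvSpans]
    · rw [if_neg hr]
      have hge := PySem.Chars.neg_one_le_find (inputString.toList.drop k) searchTerm.toList
      have hf0 : 0 ≤ PySem.Chars.find (inputString.toList.drop k) searchTerm.toList := by omega
      have hpre := (PySem.Chars.find_spec hf0).1
      obtain ⟨fn, hfn⟩ : ∃ n : Nat,
          PySem.Chars.find (inputString.toList.drop k) searchTerm.toList = (n : Int) :=
        ⟨_, (Int.toNat_of_nonneg hf0).symm⟩
      rw [hfn] at hpre ⊢
      rw [if_neg (by omega)]
      have hsl : 0 < searchTerm.toList.length := List.length_pos_iff.2 hsub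
      have hlen : fn + searchTerm.toList.length ≤ inputString.toList.length - k := by
        have := List.IsPrefix.length_le hpre
        simp only [List.length_drop, Int.toNat_natCast] at this
        omega
      have hcast : (k : Int) + fn + (searchTerm.toList.length : Int)
          = ((k + fn + searchTerm.toList.length : Nat) : Int) := by push_cast; ring
      rw [hcast, ih _ _ (by omega) (by omega)]
      conv_rhs => rw [pverParts]
      rw [dif_neg (by rw [hfn]; simp [hsub])]
      rw [hfn, Int.toNat_natCast, List.drop_drop]
      rw [show k + (fn + searchTerm.toList.length) = k + fn + searchTerm.toList.length from by omega]
      obtain ⟨q, rest', hq⟩ := List.exists_cons_of_ne_nil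
        (pverParts_ne_nil searchTerm.toList (inputString.toList.drop (k + fn + searchTerm.toList.length)))
      rw [hq, pvSpans]
      have htake : ((inputString.toList.drop k).take fn).length = fn := by
        simp only [List.length_take, List.length_drop]; omega
      rw [htake]
      simp only [List.append_assoc, List.cons_append, List.nil_append]
      congr 2

lemma foldB_spec (w : Int) (tag : String) :
    ∀ (parts : List (List Char)) (pos : Int) (acc : List (Int × Int × String)),
      ((parts.dropLast).foldl
        (fun st p =>
          (st.1 + (p.length : Int) + w,
           st.2 ++ [(st.1 + (p.length : Int), st.1 + (p.length : Int) + w, tag)]))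
        (pos, acc)).2 = acc ++ pvSpans w tag parts pos := by
  intro parts
  induction parts with
  | nil => intro pos acc; simp [pvSpans]
  | cons p ps ih =>
    intro pos acc
    match ps with
    | [] => simp [pvSpans]
    | q :: rest =>
      rw [List.dropLast_cons₂, List.foldl_cons, ih]
      rw [pvSpans]
      simp

theorem main_eq (searchTerm inputString entityTag : String) :
    findAllEntities searchTerm inputString entityTag
      = findAllEntities_alt searchTerm inputString entityTag := by
  rw [findAllEntities, findAllEntities_alt]
  by_cases hg : PySem.Str.len searchTerm < 1 ∨ PySem.Str.len inputString < 1 ∨ PySem.Str.len entityTag < 1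
  · rw [if_pos hg, if_pos hg]
  · rw [if_neg hg, if_neg hg]
    push Not at hg
    have hsub : searchTerm.toList ≠ [] := by
      have := hg.1; rw [PySem.Str.len_eq] at this
      intro h; rw [h] at this; simp at this
    have h0 := loopA_spec searchTerm inputString entityTag hsub
      (inputString.toList.length + 1) 0 [] (by omega) (by omega)
    simp only [Nat.cast_zero] at h0
    rw [h0, List.drop_zero, List.nil_append]
    -- right-hand side
    rw [PySem.Str.split?]
    rw [PySem.Chars.split?, if_neg (by simp [hsub])]
    simp only [Option.map_some]
    rw [PySem.List.slice_to_neg_one, ← List.map_dropLast, List.foldl_map]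
    simp only [PySem.Str.len_eq, String.toList_ofList]
    rw [foldB_spec ((searchTerm.toList.length : Int)) (PySem.Str.upper entityTag)
      (PySem.Chars.splitOn inputString.toList searchTerm.toList) 0 []]
    rw [List.nil_append, splitOn_eq_pverParts _ _ hsub]

-- ===== VERDICT (by name: the statement is the Claim_ definition above) =====
theorem findAllEntities_spec : Claim_equal_findAllEntities := by
  intro searchTerm inputString entityTag _
  unfold Spec_findAllEntities
  exact main_eq searchTerm inputString entityTag
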